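-- pv_equiv track=rewrite | github.com/ydottie/hlaproject | notebooks/utils.py | compute_resolution
-- ===== SOURCE A (Python) =====
-- def fix(s):
--     firstcolon = s.find(":")
--
--     # if there is only one field prediction
--     if firstcolon == -1:
--         star = s.find("*")
--         s_new = s[star+1:]
--         s_new.ljust(4, '-') # '-' is a placeholder value to pad the string ot length 4 when there is only 1-field prediction
--     else:
--         s_new = s[firstcolon-2:firstcolon] + s[firstcolon+1:firstcolon+3]
--
--     return s_new
--
-- def compute_resolution(gs_val,pre_val):
--     gs_all = gs_val.split("/")
--     pre_fixed = fix(pre_val)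
--     flag = False #false = inaccurate, turn to true = One field accurate
--
--     for val in gs_all:
--         gs_fixed = fix(val)
--
--         if (gs_fixed[0:2] == pre_fixed[0:2]):
--             if (gs_fixed[2:4] == pre_fixed[2:4]):
--                 return 2
--             flag = True # use flag, rather than "return 2", because there can be multiple val to compare
--
--     return 1 if flag==True else 0
-- ===== SOURCE B (Python) =====
-- def fix(s):
--     firstcolon = s.find(":")
--
--     # if there is only one field prediction
--     if firstcolon == -1:
--         star = s.find("*")
--         s_new = s[star+1:]
--         s_new.ljust(4, '-') # '-' is a placeholder value to pad the string ot length 4 when there is only 1-field prediction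
--     else:
--         s_new = s[firstcolon-2:firstcolon] + s[firstcolon+1:firstcolon+3]
--
--     return s_new
--
-- def compute_resolution(gs_val, pre_val):
--     p = fix(pre_val)
--     # index the gold-standard alleles once as a set of (field1, field2) keys,
--     # then answer with two membership tests instead of scanning with a flag
--     keys = {(g[0:2], g[2:4]) for g in map(fix, gs_val.split("/"))}
--     if (p[0:2], p[2:4]) in keys:
--         return 2
--     if p[0:2] in {a for a, _ in keys}:
--         return 1
--     return 0
-- ===== Notes on version B (the rewrite author's own statement) =====
-- stated objective: alternative
-- what changed: A's single short-circuit loop with a one-field flag accumulator is replaced by building a set index of (field1, field2) keys from the gold-standard values and answering with two set-membership tests (exact-key lookup, then first-field lookup).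
import Mathlib
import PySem

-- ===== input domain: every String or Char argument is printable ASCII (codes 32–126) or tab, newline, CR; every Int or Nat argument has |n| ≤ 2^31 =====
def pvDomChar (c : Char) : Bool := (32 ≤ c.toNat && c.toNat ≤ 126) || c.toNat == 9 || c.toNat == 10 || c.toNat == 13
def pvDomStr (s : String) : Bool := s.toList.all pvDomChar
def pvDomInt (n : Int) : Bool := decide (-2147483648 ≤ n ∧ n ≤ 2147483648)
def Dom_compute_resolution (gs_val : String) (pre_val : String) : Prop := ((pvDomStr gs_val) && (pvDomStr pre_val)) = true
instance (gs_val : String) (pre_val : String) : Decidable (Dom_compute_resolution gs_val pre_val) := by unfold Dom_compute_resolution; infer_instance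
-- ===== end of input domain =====

-- B replaces A's short-circuit flag loop by a set index of (field1, field2) keys
-- queried with two membership tests (objective: alternative decomposition, same cost).


-- ===== PORT A =====
-- `fix` is shared verbatim by A and B (it is the same helper in both Python files).
def fix (s : String) : String :=
  let firstcolon := PySem.Str.find s ":"
  if firstcolon == -1 then
    let star := PySem.Str.find s "*"
    -- Python also computes s_new.ljust(4, '-') here and DISCARDS the result (no effect)
    PySem.Str.slice s (some (star + 1)) none
  else
    PySem.Str.slice s (some (firstcolon - 2)) (some firstcolon) ++
      PySem.Str.slice s (some (firstcolon + 1)) (some (firstcolon + 3))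

-- A's for-loop with early return and the `flag` accumulator
def crLoop (pre_fixed : String) : List String → Bool → Int
  | [], flag => if flag then 1 else 0
  | val :: rest, flag =>
    let gs_fixed := fix val
    if PySem.Str.slice gs_fixed (some 0) (some 2) = PySem.Str.slice pre_fixed (some 0) (some 2) then
      if PySem.Str.slice gs_fixed (some 2) (some 4) = PySem.Str.slice pre_fixed (some 2) (some 4) then
        2
      else
        crLoop pre_fixed rest true
    else
      crLoop pre_fixed rest flag

def compute_resolution (gs_val : String) (pre_val : String) : Int :=
  let gs_all := (PySem.Str.split? gs_val "/").getD []   -- sep "/" ≠ "", so split? is always some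
  let pre_fixed := fix pre_val
  crLoop pre_fixed gs_all false

-- ===== PORT B =====
-- (g[0:2], g[2:4]) for g = fix v
def crKey (v : String) : String × String :=
  let g := fix v
  (PySem.Str.slice g (some 0) (some 2), PySem.Str.slice g (some 2) (some 4))

def compute_resolution_alt (gs_val : String) (pre_val : String) : Int :=
  let p := fix pre_val
  let keys : PySem.Set (String × String) :=
    PySem.Set.ofList (((PySem.Str.split? gs_val "/").getD []).map crKey)
  if PySem.Set.contains keys
      (PySem.Str.slice p (some 0) (some 2), PySem.Str.slice p (some 2) (some 4)) then 2
  else if PySem.Set.contains (PySem.Set.ofList (keys.map Prod.fst))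
      (PySem.Str.slice p (some 0) (some 2)) then 1
  else 0

-- ===== PRECONDITION & SPEC =====
def Spec_compute_resolution (gs_val : String) (pre_val : String) (out : Int) : Prop := out = compute_resolution_alt gs_val pre_val
instance (gs_val : String) (pre_val : String) (out : Int) : Decidable (Spec_compute_resolution gs_val pre_val out) := by unfold Spec_compute_resolution; infer_instance

-- ===== CLAIM =====
def Claim_equal_compute_resolution : Prop := ∀ (gs_val : String) (pre_val : String), Dom_compute_resolution gs_val pre_val → Spec_compute_resolution gs_val pre_val (compute_resolution gs_val pre_val)

-- ===== LEMMAS AND PROOFS =====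
theorem crKey_fst (v : String) : (crKey v).1 = PySem.Str.slice (fix v) (some 0) (some 2) := rfl

theorem crKey_eq_iff (v : String) (a b : String) : crKey v = (a, b) ↔
    PySem.Str.slice (fix v) (some 0) (some 2) = a ∧ PySem.Str.slice (fix v) (some 2) (some 4) = b := by
  simp [crKey, Prod.ext_iff]

/-- A's loop computes: 2 if some value matches on both fields, else 1 if the flag is set
    or some value matches on the first field, else 0. -/
theorem crLoop_character (p : String) (l : List String) : ∀ flag : Bool,
    crLoop p l flag =
      if ∃ v ∈ l, crKey v = (PySem.Str.slice p (some 0) (some 2), PySem.Str.slice p (some 2) (some 4)) then 2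
      else if flag = true ∨ ∃ v ∈ l, (crKey v).1 = PySem.Str.slice p (some 0) (some 2) then 1
      else 0 := by
  induction l with
  | nil => intro flag; cases flag <;> simp [crLoop]
  | cons x t ih =>
    intro flag
    simp only [List.exists_mem_cons_iff, crKey_eq_iff, crKey_fst]
    by_cases h1 : PySem.Str.slice (fix x) (some 0) (some 2) = PySem.Str.slice p (some 0) (some 2)
    · by_cases h2 : PySem.Str.slice (fix x) (some 2) (some 4) = PySem.Str.slice p (some 2) (some 4)
      · simp [crLoop, h1, h2]
      · rw [show crLoop p (x :: t) flag = crLoop p t true from by rw [crLoop]; simp [h1, h2]]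
        rw [ih true]
        simp only [crKey_eq_iff, crKey_fst]
        simp [h1, h2]
    · rw [show crLoop p (x :: t) flag = crLoop p t flag from by rw [crLoop]; simp [h1]]
      rw [ih flag]
      simp only [crKey_eq_iff, crKey_fst]
      simp only [h1, false_and, false_or]
      split_ifs <;> rfl

-- ===== VERDICT =====
theorem compute_resolution_spec : Claim_equal_compute_resolution := by
  intro gs_val pre_val _
  unfold Spec_compute_resolution compute_resolution compute_resolution_alt
  set p := fix pre_val
  set l := (PySem.Str.split? gs_val "/").getD []
  rw [crLoop_character]
  have m2 : PySem.Set.contains (PySem.Set.ofList (l.map crKey))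
      (PySem.Str.slice p (some 0) (some 2), PySem.Str.slice p (some 2) (some 4)) = true ↔
      ∃ v ∈ l, crKey v = (PySem.Str.slice p (some 0) (some 2), PySem.Str.slice p (some 2) (some 4)) := by
    rw [PySem.Set.contains_iff, PySem.Set.mem_ofList, List.mem_map]
  have m1 : PySem.Set.contains (PySem.Set.ofList ((PySem.Set.ofList (l.map crKey)).map Prod.fst))
      (PySem.Str.slice p (some 0) (some 2)) = true ↔
      ∃ v ∈ l, (crKey v).1 = PySem.Str.slice p (some 0) (some 2) := by
    rw [PySem.Set.contains_iff, PySem.Set.mem_ofList, List.mem_map]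
    constructor
    · rintro ⟨k, hk, h1⟩
      rw [PySem.Set.mem_ofList] at hk
      rcases List.mem_map.mp hk with ⟨v, hv, rfl⟩
      exact ⟨v, hv, h1⟩
    · rintro ⟨v, hv, h1⟩
      refine ⟨crKey v, ?_, h1⟩
      rw [PySem.Set.mem_ofList]
      exact List.mem_map.mpr ⟨v, hv, rfl⟩
  by_cases h2 : ∃ v ∈ l, crKey v = (PySem.Str.slice p (some 0) (some 2), PySem.Str.slice p (some 2) (some 4))
  · simp [h2]
  · have h2' : PySem.Set.contains (PySem.Set.ofList (l.map crKey))
        (PySem.Str.slice p (some 0) (some 2), PySem.Str.slice p (some 2) (some 4)) = false := by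
      rcases Bool.eq_false_or_eq_true (PySem.Set.contains (PySem.Set.ofList (l.map crKey))
        (PySem.Str.slice p (some 0) (some 2), PySem.Str.slice p (some 2) (some 4))) with h | h
      · exact absurd (m2.mp h) h2
      · exact h
    by_cases h1 : ∃ v ∈ l, (crKey v).1 = PySem.Str.slice p (some 0) (some 2)
    · simp [h2, h1]
    · have h1' : PySem.Set.contains (PySem.Set.ofList ((PySem.Set.ofList (l.map crKey)).map Prod.fst))
          (PySem.Str.slice p (some 0) (some 2)) = false := by
        rcases Bool.eq_false_or_eq_true (PySem.Set.contains (PySem.Set.ofList ((PySem.Set.ofList (l.map crKey)).map Prod.fst))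
          (PySem.Str.slice p (some 0) (some 2))) with h | h
        · exact absurd (m1.mp h) h1
        · exact h
      simp [h2, h1]
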